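-- pv_equiv track=rewrite | github.com/martinakbrehm/projeto_neo | db/setup_database.py | reorder_statements
-- ===== SOURCE A (Python) =====
-- def reorder_statements(statements: list[str]) -> list[str]:
--     """
--     Reordena statements para reduzir erros de dependência:
--       1) CREATE TABLE
--       2) ALTER TABLE / CREATE INDEX
--       3) INSERT/UPSERT
--       4) CREATE VIEW
--       5) CREATE PROCEDURE/FUNCTION
--       6) CREATE TRIGGER/EVENT/OTHER
--     """
--     buckets = {
--         "create_table": [],
--         "alter_index": [],
--         "inserts": [],
--         "views": [],
--         "procs": [],
--         "triggers": [],
--         "other": [],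
--     }
--
--     def kind_of(stmt: str) -> str:
--         body = "\n".join(ln for ln in stmt.splitlines() if ln.strip() and not ln.strip().startswith("--")).strip().lower()
--         if body.startswith("create table"):
--             return "create_table"
--         if body.startswith("alter table") or body.startswith("create index") or "index" in body and body.startswith("alter"):
--             return "alter_index"
--         if body.startswith("insert into") or body.startswith("replace into"):
--             return "inserts"
--         if body.startswith("create view") or body.startswith("create or replace view"):
--             return "views"
--         if body.startswith("create procedure") or body.startswith("create function"):
--             return "procs"
--         if body.startswith("create trigger") or body.startswith("create event"):
--             return "triggers"
--         return "other"
--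
--     for stmt in statements:
--         buckets[kind_of(stmt)].append(stmt)
--
--     ordered = (
--         buckets["create_table"]
--         + buckets["alter_index"]
--         + buckets["inserts"]
--         + buckets["views"]
--         + buckets["procs"]
--         + buckets["triggers"]
--         + buckets["other"]
--     )
--     return ordered
-- ===== SOURCE B (Python) =====
-- def reorder_statements(statements: list[str]) -> list[str]:
--     """One stable sort by a 0..6 priority instead of bucket lists."""
--     def priority_of(stmt: str) -> int:
--         body = "\n".join(ln for ln in stmt.splitlines() if ln.strip() and not ln.strip().startswith("--")).strip().lower()
--         if body.startswith("create table"):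
--             return 0
--         if body.startswith("alter table") or body.startswith("create index") or "index" in body and body.startswith("alter"):
--             return 1
--         if body.startswith("insert into") or body.startswith("replace into"):
--             return 2
--         if body.startswith("create view") or body.startswith("create or replace view"):
--             return 3
--         if body.startswith("create procedure") or body.startswith("create function"):
--             return 4
--         if body.startswith("create trigger") or body.startswith("create event"):
--             return 5
--         return 6
--     return sorted(statements, key=priority_of)
-- ===== Notes on version B (the rewrite author's own statement) =====
-- stated objective: idiomatic
-- what changed: Replaces the seven explicit bucket lists and concatenation with one stable sorted() call keyed by an integer priority 0..6 (same classifier, including its 'index'/'alter' precedence expression); stability preserves within-category order.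
import Mathlib
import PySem

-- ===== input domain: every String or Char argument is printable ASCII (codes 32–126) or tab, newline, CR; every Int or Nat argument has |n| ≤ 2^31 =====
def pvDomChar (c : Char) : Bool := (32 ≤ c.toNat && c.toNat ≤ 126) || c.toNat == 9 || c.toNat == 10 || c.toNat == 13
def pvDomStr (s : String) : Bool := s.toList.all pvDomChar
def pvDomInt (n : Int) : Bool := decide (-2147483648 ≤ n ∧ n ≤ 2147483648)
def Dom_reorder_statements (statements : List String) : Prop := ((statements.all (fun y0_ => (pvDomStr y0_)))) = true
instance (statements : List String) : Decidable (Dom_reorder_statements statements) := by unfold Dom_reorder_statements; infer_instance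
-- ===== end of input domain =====

-- B replaces A's seven bucket lists + concatenation by one stable sort keyed by an
-- integer priority 0..6 (same classifier, including its 'index'/'alter' precedence
-- expression); objective: idiomatic, same return value.

-- ===== PORT A =====
def pvBodyA (stmt : String) : String :=
  PySem.Str.lower (PySem.Str.strip (PySem.Str.join "\n"
    ((PySem.Str.splitlines stmt).filter
      (fun ln => (PySem.Str.strip ln != "") && !(PySem.Str.startswith (PySem.Str.strip ln) "--")))))

def pvKindA (stmt : String) : String :=
  if PySem.Str.startswith (pvBodyA stmt) "create table" then "create_table"
  else if PySem.Str.startswith (pvBodyA stmt) "alter table" || PySem.Str.startswith (pvBodyA stmt) "create index" ||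
          (PySem.Str.isIn "index" (pvBodyA stmt) && PySem.Str.startswith (pvBodyA stmt) "alter") then "alter_index"
  else if PySem.Str.startswith (pvBodyA stmt) "insert into" || PySem.Str.startswith (pvBodyA stmt) "replace into" then "inserts"
  else if PySem.Str.startswith (pvBodyA stmt) "create view" || PySem.Str.startswith (pvBodyA stmt) "create or replace view" then "views"
  else if PySem.Str.startswith (pvBodyA stmt) "create procedure" || PySem.Str.startswith (pvBodyA stmt) "create function" then "procs"
  else if PySem.Str.startswith (pvBodyA stmt) "create trigger" || PySem.Str.startswith (pvBodyA stmt) "create event" then "triggers"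
  else "other"

structure PvBuckets where
  ct : List String
  ai : List String
  ins : List String
  vw : List String
  pr : List String
  tr : List String
  ot : List String
  deriving DecidableEq, Repr

-- buckets[k].append(s) for A's fixed-key dict of lists
def pvBApp (b : PvBuckets) (k : String) (s : String) : PvBuckets :=
  if k = "create_table" then { b with ct := b.ct ++ [s] }
  else if k = "alter_index" then { b with ai := b.ai ++ [s] }
  else if k = "inserts" then { b with ins := b.ins ++ [s] }
  else if k = "views" then { b with vw := b.vw ++ [s] }
  else if k = "procs" then { b with pr := b.pr ++ [s] }
  else if k = "triggers" then { b with tr := b.tr ++ [s] }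
  else { b with ot := b.ot ++ [s] }

def pvOrdered (bk : PvBuckets) : List String :=
  bk.ct ++ bk.ai ++ bk.ins ++ bk.vw ++ bk.pr ++ bk.tr ++ bk.ot

def reorder_statements (statements : List String) : List String :=
  pvOrdered (statements.foldl (fun b stmt => pvBApp b (pvKindA stmt) stmt)
    ⟨[], [], [], [], [], [], []⟩)

-- ===== PORT B =====
def pvBodyB (stmt : String) : String :=
  PySem.Str.lower (PySem.Str.strip (PySem.Str.join "\n"
    ((PySem.Str.splitlines stmt).filter
      (fun ln => (PySem.Str.strip ln != "") && !(PySem.Str.startswith (PySem.Str.strip ln) "--")))))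

def pvPrioB (stmt : String) : Int :=
  if PySem.Str.startswith (pvBodyB stmt) "create table" then 0
  else if PySem.Str.startswith (pvBodyB stmt) "alter table" || PySem.Str.startswith (pvBodyB stmt) "create index" ||
          (PySem.Str.isIn "index" (pvBodyB stmt) && PySem.Str.startswith (pvBodyB stmt) "alter") then 1
  else if PySem.Str.startswith (pvBodyB stmt) "insert into" || PySem.Str.startswith (pvBodyB stmt) "replace into" then 2
  else if PySem.Str.startswith (pvBodyB stmt) "create view" || PySem.Str.startswith (pvBodyB stmt) "create or replace view" then 3
  else if PySem.Str.startswith (pvBodyB stmt) "create procedure" || PySem.Str.startswith (pvBodyB stmt) "create function" then 4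
  else if PySem.Str.startswith (pvBodyB stmt) "create trigger" || PySem.Str.startswith (pvBodyB stmt) "create event" then 5
  else 6

def reorder_statements_alt (statements : List String) : List String :=
  PySem.List.sorted statements pvPrioB

-- ===== PRECONDITION & SPEC =====
def Spec_reorder_statements (statements : List String) (out : List String) : Prop := out = reorder_statements_alt statements
instance (statements : List String) (out : List String) : Decidable (Spec_reorder_statements statements out) := by unfold Spec_reorder_statements; infer_instance

-- ===== CLAIM (what is proved, stated in full; the proofs are below) =====
def Claim_equal_reorder_statements : Prop := ∀ (statements : List String), Dom_reorder_statements statements → Spec_reorder_statements statements (reorder_statements statements)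

-- ===== LEMMAS AND PROOFS =====

theorem pvBody_eq (s : String) : pvBodyA s = pvBodyB s := rfl

theorem pvKind_prio (s : String) :
    (decide (pvKindA s = "create_table") = decide (pvPrioB s = 0)) ∧
    (decide (pvKindA s = "alter_index") = decide (pvPrioB s = 1)) ∧
    (decide (pvKindA s = "inserts") = decide (pvPrioB s = 2)) ∧
    (decide (pvKindA s = "views") = decide (pvPrioB s = 3)) ∧
    (decide (pvKindA s = "procs") = decide (pvPrioB s = 4)) ∧
    (decide (pvKindA s = "triggers") = decide (pvPrioB s = 5)) ∧
    (decide (pvKindA s = "other") = decide (pvPrioB s = 6)) := by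
  simp only [pvKindA, pvPrioB, ← pvBody_eq]
  split_ifs <;> refine ⟨?_, ?_, ?_, ?_, ?_, ?_, ?_⟩ <;> decide

theorem pvKindA_range (s : String) :
    pvKindA s = "create_table" ∨ pvKindA s = "alter_index" ∨ pvKindA s = "inserts" ∨
    pvKindA s = "views" ∨ pvKindA s = "procs" ∨ pvKindA s = "triggers" ∨ pvKindA s = "other" := by
  simp only [pvKindA]; split_ifs <;> simp

theorem pvPrioB_range (s : String) :
    pvPrioB s = 0 ∨ pvPrioB s = 1 ∨ pvPrioB s = 2 ∨ pvPrioB s = 3 ∨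
    pvPrioB s = 4 ∨ pvPrioB s = 5 ∨ pvPrioB s = 6 := by
  simp only [pvPrioB]; split_ifs <;> simp

-- A-side: the bucket fold computes per-kind filters.
def pvKF (name : String) (xs : List String) : List String :=
  xs.filter (fun s => decide (pvKindA s = name))

theorem pvFoldA (xs : List String) (b : PvBuckets) :
    xs.foldl (fun b stmt => pvBApp b (pvKindA stmt) stmt) b =
      ⟨b.ct ++ pvKF "create_table" xs, b.ai ++ pvKF "alter_index" xs,
       b.ins ++ pvKF "inserts" xs, b.vw ++ pvKF "views" xs,
       b.pr ++ pvKF "procs" xs, b.tr ++ pvKF "triggers" xs,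
       b.ot ++ pvKF "other" xs⟩ := by
  induction xs generalizing b with
  | nil => simp [pvKF]
  | cons x xs ih =>
    rw [List.foldl_cons, ih]
    rcases pvKindA_range x with h | h | h | h | h | h | h <;>
      simp [pvBApp, pvKF, h]

-- B-side: stable insertion keyed by priority.
theorem pvInsertBy_prefix {α : Type} (b : α → α → Bool) (x : α) (L1 L2 : List α)
    (h1 : ∀ y ∈ L1, b x y = false) :
    PySem.List.insertBy b x (L1 ++ L2) = L1 ++ PySem.List.insertBy b x L2 := by
  induction L1 with
  | nil => rfl
  | cons a as ih =>
    simp only [List.cons_append, PySem.List.insertBy, h1 a (by simp)]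
    simp [ih (fun y hy => h1 y (by simp [hy]))]

theorem pvInsertBy_all_before {α : Type} (b : α → α → Bool) (x : α) (L : List α)
    (h : ∀ y ∈ L, b x y = true) :
    PySem.List.insertBy b x L = x :: L := by
  cases L with
  | nil => rfl
  | cons a as => simp [PySem.List.insertBy, h a (by simp)]

def pvF (j : Int) (xs : List String) : List String :=
  xs.filter (fun s => decide (pvPrioB s = j))

theorem pvFlatMap_congr (js : List Int) (f g : Int → List String)
    (h : ∀ j ∈ js, f j = g j) : js.flatMap f = js.flatMap g := by
  induction js with
  | nil => rfl
  | cons a as ih =>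
    simp only [List.flatMap_cons, h a (by simp), ih (fun j hj => h j (by simp [hj]))]

-- inserting x into a key-ordered concatenation of priority filters appends it to its own group
theorem pvInsert_flatMap (x : String) (pre : List String) :
    ∀ (ks : List Int), pvPrioB x ∈ ks → ks.Pairwise (· < ·) →
    PySem.List.insertBy (fun a b => decide (pvPrioB a < pvPrioB b)) x
        (ks.flatMap (fun j => pvF j pre)) =
      ks.flatMap (fun j => pvF j (pre ++ [x])) := by
  intro ks
  induction ks with
  | nil => intro h; cases h
  | cons j js ih =>
    intro hmem hp
    have hpj := (List.pairwise_cons.mp hp).1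
    have hptl := (List.pairwise_cons.mp hp).2
    simp only [List.flatMap_cons]
    by_cases hjx : pvPrioB x = j
    · -- x belongs to the head group; everything after has strictly larger key
      rw [pvInsertBy_prefix _ _ _ _ (by
          intro y hy
          simp only [pvF, List.mem_filter, decide_eq_true_eq] at hy
          simp [hjx, hy.2]),
        pvInsertBy_all_before _ _ _ (by
          intro y hy
          simp only [List.mem_flatMap, pvF, List.mem_filter, decide_eq_true_eq] at hy
          obtain ⟨j', hj', _, hy2⟩ := hy
          simp [hjx, hy2, hpj j' hj'])]
      have hhead : pvF j (pre ++ [x]) = pvF j pre ++ [x] := by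
        simp [pvF, List.filter_append, hjx]
      have htl : ∀ j' ∈ js, pvF j' (pre ++ [x]) = pvF j' pre := by
        intro j' hj'
        have : pvPrioB x ≠ j' := by
          have := hpj j' hj'; omega
        simp [pvF, List.filter_append, this]
      have htl2 : List.flatMap (fun j' => pvF j' (pre ++ [x])) js =
          List.flatMap (fun j' => pvF j' pre) js := pvFlatMap_congr js _ _ htl
      rw [hhead, htl2]
      simp
    · -- x skips the head group
      have hmem' : pvPrioB x ∈ js := by
        rcases List.mem_cons.mp hmem with h | h
        · exact absurd h hjx
        · exact h
      rw [pvInsertBy_prefix _ _ _ _ (by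
          intro y hy
          simp only [pvF, List.mem_filter, decide_eq_true_eq] at hy
          have : j < pvPrioB x := hpj _ hmem'
          simp [hy.2]; omega),
        ih hmem' hptl]
      have : pvF j (pre ++ [x]) = pvF j pre := by
        simp [pvF, List.filter_append, hjx]
      rw [this]

theorem pvFoldB (xs : List String) : ∀ (pre : List String),
    xs.foldl (fun acc x => PySem.List.insertBy (fun a b => decide (pvPrioB a < pvPrioB b)) x acc)
        (([0, 1, 2, 3, 4, 5, 6] : List Int).flatMap (fun j => pvF j pre)) =
      ([0, 1, 2, 3, 4, 5, 6] : List Int).flatMap (fun j => pvF j (pre ++ xs)) := by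
  induction xs with
  | nil => intro pre; simp
  | cons x xs ih =>
    intro pre
    rw [List.foldl_cons,
      pvInsert_flatMap x pre [0, 1, 2, 3, 4, 5, 6]
        (by rcases pvPrioB_range x with h | h | h | h | h | h | h <;> simp [h])
        (by decide),
      ih (pre ++ [x])]
    simp

theorem pvAlt_eq (statements : List String) :
    reorder_statements_alt statements =
      ([0, 1, 2, 3, 4, 5, 6] : List Int).flatMap (fun j => pvF j statements) := by
  rw [reorder_statements_alt, PySem.List.sorted_eq_foldl_insertBy]
  have := pvFoldB statements []
  simp only [pvF, List.filter_nil, List.nil_append] at this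
  simpa [pvF] using this

theorem pvKF_eq_pvF (statements : List String) :
    pvKF "create_table" statements = pvF 0 statements ∧
    pvKF "alter_index" statements = pvF 1 statements ∧
    pvKF "inserts" statements = pvF 2 statements ∧
    pvKF "views" statements = pvF 3 statements ∧
    pvKF "procs" statements = pvF 4 statements ∧
    pvKF "triggers" statements = pvF 5 statements ∧
    pvKF "other" statements = pvF 6 statements := by
  simp only [pvKF, pvF]
  exact ⟨List.filter_congr (fun s _ => (pvKind_prio s).1),
    List.filter_congr (fun s _ => (pvKind_prio s).2.1),
    List.filter_congr (fun s _ => (pvKind_prio s).2.2.1),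
    List.filter_congr (fun s _ => (pvKind_prio s).2.2.2.1),
    List.filter_congr (fun s _ => (pvKind_prio s).2.2.2.2.1),
    List.filter_congr (fun s _ => (pvKind_prio s).2.2.2.2.2.1),
    List.filter_congr (fun s _ => (pvKind_prio s).2.2.2.2.2.2)⟩

-- ===== VERDICT (by name: the statement is the Claim_ definition above) =====
theorem reorder_statements_spec : Claim_equal_reorder_statements := by
  intro statements _
  unfold Spec_reorder_statements
  rw [reorder_statements, pvFoldA, pvAlt_eq]
  simp only [pvOrdered]
  obtain ⟨h0, h1, h2, h3, h4, h5, h6⟩ := pvKF_eq_pvF statements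
  simp [h0, h1, h2, h3, h4, h5, h6]
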